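-- pv_equiv track=rewrite | github.com/SteveJiangWorkPlace/Otium_wip | backend/api_services.py | normalize_paragraph_spacing
-- ===== SOURCE A (Python) =====
-- def normalize_paragraph_spacing(text: str, max_empty_lines: int = 1) -> str:
--     """规范化段落间距，确保不超过指定数量的空行
--
--     Args:
--         text: 输入文本
--         max_empty_lines: 允许的最大连续空行数（默认1）
--
--     Returns:
--         处理后的文本
--     """
--     import re
--
--     if not text:
--         return text
--
--     # 分割为行
--     lines = text.split('\n')
--     processed_lines = []
--     empty_count = 0
--
--     for line in lines:
--         if line.strip() == '':
--             empty_count += 1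
--             if empty_count <= max_empty_lines:
--                 processed_lines.append(line)
--         else:
--             empty_count = 0
--             processed_lines.append(line)
--
--     return '\n'.join(processed_lines)
-- ===== SOURCE B (Python) =====
-- from itertools import groupby
--
--
-- def normalize_paragraph_spacing(text: str, max_empty_lines: int = 1) -> str:
--     """Run-based rewrite: group lines into blank/non-blank runs and truncate blank runs."""
--     result = []
--     for is_blank, group in groupby(text.split('\n'), key=lambda line: line.strip() == ''):
--         if is_blank:
--             result.extend(list(group)[:max(0, max_empty_lines)])
--         else:
--             result.extend(group)
--     return '\n'.join(result)
-- ===== Notes on version B (the rewrite author's own statement) =====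
-- stated objective: idiomatic
-- what changed: Replaces the per-line running empty-line counter with an itertools.groupby traversal over runs of blank/non-blank lines, truncating each blank run to max(0, max_empty_lines) lines.
import Mathlib
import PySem

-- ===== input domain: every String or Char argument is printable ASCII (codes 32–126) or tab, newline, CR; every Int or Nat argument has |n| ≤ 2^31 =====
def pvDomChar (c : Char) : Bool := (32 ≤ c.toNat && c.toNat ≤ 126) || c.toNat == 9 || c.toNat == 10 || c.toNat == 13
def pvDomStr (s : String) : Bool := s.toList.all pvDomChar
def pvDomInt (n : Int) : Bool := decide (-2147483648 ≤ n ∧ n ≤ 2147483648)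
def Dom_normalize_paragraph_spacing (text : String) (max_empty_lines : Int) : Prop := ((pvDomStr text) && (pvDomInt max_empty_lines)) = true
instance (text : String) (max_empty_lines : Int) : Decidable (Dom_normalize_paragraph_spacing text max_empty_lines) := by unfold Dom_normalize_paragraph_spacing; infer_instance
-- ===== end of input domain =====

-- B replaces A's per-line running empty-line counter by a groupby-style traversal of
-- maximal blank/non-blank runs, truncating each blank run; objective: more idiomatic.

-- ===== PORT A =====
-- `line.strip() == ''` — shared by both Python sources, so a shared helper
def pvBlank (l : List Char) : Bool := PySem.Chars.strip l == []

def normalize_paragraph_spacing (text : String) (max_empty_lines : Int) : String :=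
  if text == "" then text
  else
    let lines := PySem.Chars.splitOn text.toList ['\n']
    let st := lines.foldl (fun (st : Int × List (List Char)) line =>
      if pvBlank line then
        (st.1 + 1, if st.1 + 1 ≤ max_empty_lines then st.2 ++ [line] else st.2)
      else (0, st.2 ++ [line])) ((0 : Int), ([] : List (List Char)))
    String.ofList (PySem.Chars.join ['\n'] st.2)

-- ===== PORT B =====
-- itertools.groupby(lines, key=blank?): the list of (key, run) pairs
def pvGroupRuns : List (List Char) → List (Bool × List (List Char))
  | [] => []
  | l :: rest =>
    (pvBlank l, l :: rest.takeWhile (fun x => pvBlank x == pvBlank l)) ::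
      pvGroupRuns (rest.dropWhile (fun x => pvBlank x == pvBlank l))
termination_by xs => xs.length
decreasing_by
  simp only [List.length_cons]
  exact Nat.lt_succ_of_le (List.length_dropWhile_le _ _)

def normalize_paragraph_spacing_alt (text : String) (max_empty_lines : Int) : String :=
  let runs := pvGroupRuns (PySem.Chars.splitOn text.toList ['\n'])
  let result := runs.foldl (fun acc g =>
      if g.1 then acc ++ g.2.take (max 0 max_empty_lines).toNat else acc ++ g.2)
    ([] : List (List Char))
  String.ofList (PySem.Chars.join ['\n'] result)

-- ===== PRECONDITION & SPEC =====
def Spec_normalize_paragraph_spacing (text : String) (max_empty_lines : Int) (out : String) : Prop := out = normalize_paragraph_spacing_alt text max_empty_lines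
instance (text : String) (max_empty_lines : Int) (out : String) : Decidable (Spec_normalize_paragraph_spacing text max_empty_lines out) := by unfold Spec_normalize_paragraph_spacing; infer_instance

-- ===== CLAIM (what is proved, stated in full; the proofs are below) =====
def Claim_equal_normalize_paragraph_spacing : Prop := ∀ (text : String) (max_empty_lines : Int), Dom_normalize_paragraph_spacing text max_empty_lines → Spec_normalize_paragraph_spacing text max_empty_lines (normalize_paragraph_spacing text max_empty_lines)

-- ===== LEMMAS AND PROOFS =====

-- A's loop, rewritten as the list of emitted lines (state = current run-length counter)
def pvLoopA (m : Int) : Int → List (List Char) → List (List Char)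
  | _, [] => []
  | c, l :: ls =>
    if pvBlank l then (if c + 1 ≤ m then [l] else []) ++ pvLoopA m (c + 1) ls
    else l :: pvLoopA m 0 ls

lemma pvFoldA_eq (m : Int) (lines : List (List Char)) : ∀ (c : Int) (acc : List (List Char)),
    (lines.foldl (fun (st : Int × List (List Char)) line =>
      if pvBlank line then
        (st.1 + 1, if st.1 + 1 ≤ m then st.2 ++ [line] else st.2)
      else (0, st.2 ++ [line])) (c, acc)).2 = acc ++ pvLoopA m c lines := by
  induction lines with
  | nil => intro c acc; simp [pvLoopA]
  | cons l ls ih =>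
    intro c acc
    rw [List.foldl_cons]
    by_cases hb : pvBlank l
    · by_cases hc : c + 1 ≤ m
      · simp only [hb, hc, ite_true]
        rw [ih]
        simp [pvLoopA, hb, hc]
      · simp only [hb, hc, ite_true, ite_false]
        rw [ih]
        simp [pvLoopA, hb, hc]
    · simp only [hb]
      rw [ih]
      simp [pvLoopA, hb]

lemma pvLoopA_blank_run (m : Int) : ∀ (run : List (List Char)), (∀ x ∈ run, pvBlank x = true) →
    ∀ (c : Int) (rest : List (List Char)),
    pvLoopA m c (run ++ rest) = run.take (m - c).toNat ++ pvLoopA m (c + run.length) rest := by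
  intro run
  induction run with
  | nil => intro _ c rest; simp
  | cons l run' ih =>
    intro h c rest
    have hl : pvBlank l = true := h l (by simp)
    have hrun' : ∀ x ∈ run', pvBlank x = true := fun x hx => h x (by simp [hx])
    have harg : (c + 1) + (run'.length : Int) = c + ((l :: run').length : Nat) := by
      push_cast [List.length_cons]
      ring
    by_cases hc : c + 1 ≤ m
    · have h1 : (m - c).toNat = (m - (c + 1)).toNat + 1 := by omega
      simp only [List.cons_append, pvLoopA, hl, if_pos hc, ih hrun' (c + 1) rest, h1,
        List.take_succ_cons, if_true]
      rw [harg]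
      simp
    · have h1 : (m - c).toNat = 0 := by omega
      have h2 : (m - (c + 1)).toNat = 0 := by omega
      simp only [List.cons_append, pvLoopA, hl, if_neg hc, ih hrun' (c + 1) rest, h1, h2,
        List.take_zero, if_true]
      rw [harg]
      simp

lemma pvLoopA_nonblank_run (m : Int) : ∀ (run : List (List Char)), (∀ x ∈ run, pvBlank x = false) →
    ∀ (rest : List (List Char)), pvLoopA m 0 (run ++ rest) = run ++ pvLoopA m 0 rest := by
  intro run
  induction run with
  | nil => intro _ rest; simp
  | cons l run' ih =>
    intro h rest
    have hl : pvBlank l = false := h l (by simp)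
    have hrun' : ∀ x ∈ run', pvBlank x = false := fun x hx => h x (by simp [hx])
    simp [pvLoopA, hl, ih hrun' rest]

lemma pvLoopA_head (m c c' : Int) (rest : List (List Char))
    (h : ∀ l, rest.head? = some l → pvBlank l = false) :
    pvLoopA m c rest = pvLoopA m c' rest := by
  cases rest with
  | nil => rfl
  | cons l ls => simp [pvLoopA, h l rfl]

lemma pvHead_dropWhile {α : Type} (p : α → Bool) : ∀ (xs : List α) (l : α),
    (List.dropWhile p xs).head? = some l → p l = false := by
  intro xs
  induction xs with
  | nil => simp [List.dropWhile]
  | cons x xs ih =>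
    intro l h
    by_cases hx : p x
    · exact ih l (by simpa [List.dropWhile, hx] using h)
    · simp only [List.dropWhile, hx, List.head?_cons, Option.some.injEq] at h
      rw [← h]
      simpa using hx

lemma pvLoopA_eq_runs (m : Int) (lines : List (List Char)) :
    pvLoopA m 0 lines = (pvGroupRuns lines).flatMap
      (fun g => if g.1 then g.2.take (max 0 m).toNat else g.2) := by
  induction lines using pvGroupRuns.induct with
  | case1 => simp [pvLoopA, pvGroupRuns]
  | case2 l rest ih =>
    rw [pvGroupRuns]
    set p := fun x => pvBlank x == pvBlank l with hp
    have hsplit : rest.takeWhile p ++ rest.dropWhile p = rest := List.takeWhile_append_dropWhile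
    by_cases hb : pvBlank l
    · have htw : ∀ x ∈ l :: rest.takeWhile p, pvBlank x = true := by
        intro x hx
        rcases List.mem_cons.mp hx with rfl | hx'
        · exact hb
        · have h2 := List.mem_takeWhile_imp hx'
          simpa [hp, hb] using h2
      have hdw : ∀ x, (rest.dropWhile p).head? = some x → pvBlank x = false := by
        intro x hx
        have := pvHead_dropWhile p rest x hx
        simpa [hp, hb] using this
      calc pvLoopA m 0 (l :: rest)
          = pvLoopA m 0 ((l :: rest.takeWhile p) ++ rest.dropWhile p) := by
            rw [List.cons_append, hsplit]
        _ = (l :: rest.takeWhile p).take (m - 0).toNat ++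
              pvLoopA m (0 + ((l :: rest.takeWhile p).length : Nat)) (rest.dropWhile p) :=
            pvLoopA_blank_run m _ htw 0 _
        _ = (l :: rest.takeWhile p).take (max 0 m).toNat ++ pvLoopA m 0 (rest.dropWhile p) := by
            rw [pvLoopA_head m _ 0 _ hdw]
            congr 2
            omega
        _ = _ := by rw [ih]; simp [hb]
    · have hbf : pvBlank l = false := by simpa using hb
      have htw : ∀ x ∈ l :: rest.takeWhile p, pvBlank x = false := by
        intro x hx
        rcases List.mem_cons.mp hx with rfl | hx'
        · exact hbf
        · have h2 := List.mem_takeWhile_imp hx'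
          simp only [hp, beq_iff_eq] at h2
          rw [h2]
          exact hbf
      calc pvLoopA m 0 (l :: rest)
          = pvLoopA m 0 ((l :: rest.takeWhile p) ++ rest.dropWhile p) := by
            rw [List.cons_append, hsplit]
        _ = (l :: rest.takeWhile p) ++ pvLoopA m 0 (rest.dropWhile p) :=
            pvLoopA_nonblank_run m _ htw _
        _ = _ := by rw [ih]; simp [hb]

lemma pvFoldRuns (m : Int) : ∀ (runs : List (Bool × List (List Char))) (acc : List (List Char)),
    runs.foldl (fun acc g =>
        if g.1 then acc ++ g.2.take (max 0 m).toNat else acc ++ g.2) acc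
      = acc ++ runs.flatMap (fun g => if g.1 then g.2.take (max 0 m).toNat else g.2) := by
  intro runs
  induction runs with
  | nil => intro acc; simp
  | cons g gs ih =>
    intro acc
    rw [List.foldl_cons]
    by_cases hg : g.1 <;> simp [hg, ih, List.append_assoc]

lemma pvAlt_body (text : String) (m : Int) :
    normalize_paragraph_spacing_alt text m =
      String.ofList (PySem.Chars.join ['\n'] (pvLoopA m 0 (PySem.Chars.splitOn text.toList ['\n']))) := by
  simp only [normalize_paragraph_spacing_alt]
  rw [pvFoldRuns, List.nil_append, pvLoopA_eq_runs]

lemma pvAlt_empty (m : Int) : normalize_paragraph_spacing_alt "" m = "" := by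
  rw [pvAlt_body]
  have hsplit : PySem.Chars.splitOn ("" : String).toList ['\n'] = [[]] := by decide
  rw [hsplit]
  have hbl : pvBlank [] = true := by decide
  by_cases hm : 0 + 1 ≤ m
  · simp only [pvLoopA, hbl, ite_true, hm]
    decide
  · simp only [pvLoopA, hbl, ite_true, ite_false, hm]
    decide

-- ===== VERDICT (by name: the statement is the Claim_ definition above) =====
theorem normalize_paragraph_spacing_spec : Claim_equal_normalize_paragraph_spacing := by
  intro text m _
  unfold Spec_normalize_paragraph_spacing
  simp only [normalize_paragraph_spacing]
  by_cases ht : text == ""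
  · rw [if_pos ht]
    have h : text = "" := by simpa using ht
    subst h
    exact (pvAlt_empty m).symm
  · rw [if_neg ht, pvAlt_body, pvFoldA_eq m _ 0 [], List.nil_append]
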